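-- pv_equiv track=rewrite | github.com/fdelgadov/LabADAGrupoB | 13_aula10_algoritmosVoraces/tieRopes.py | tieRopes
-- ===== SOURCE A (Python) =====
-- def tieRopes(K, A: list):
--   """
--   Este programa resuele el ejercicio Tie Ropes
--   Link: https://app.codility.com/programmers/lessons/16-greedy_algorithms/tie_ropes/
--
--   Dado una lista de cuerdas A y un entero K, el programa retonar el mayor
--   número de cuerdas de tamaño >= K. Las cuerdas adyacientes pueden unirse
--   en una nueva cuerda.
--
--   Solucion:
--   El objetivo es hallar el mayor número de cuerdas >= K, teniendo en cuenta que
--   es posible unir cuerdas adyacentes. Para ello, es suficiente con sacar y unir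
--   las cuerdas con tamaño < K según el orden en el que estan dispuestas en la
--   lista A, ya que solo pueden ser unidas si son adyacentes. Cada vez que es
--   sacada una cuerda >= K, es contada para el total de la respuesta final.
--   """
--
--   # Número de cuerdas >= K
--   ropes = 0
--
--   # Se evalúan todas las cuerdas, menos la última
--   while len(A) > 1:
--     # Se saca la primera cuerda
--     actual = A.pop(0)
--
--     # Se compara la longitud de la cuerda con K
--     if actual < K:
--       # Se une la cuerda sacada con la siguiente; forman una nueva cuerda
--       A.insert(0, actual + A.pop(0))
--     else:
--       # La cuerda es >= K, entonces aumenta el contador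
--       ropes += 1
--
--   # Se evalúa la última cuerda
--   if A[0] >= K:
--     ropes += 1
--
--   # Retorna la respuesta
--   return ropes
-- ===== SOURCE B (Python) =====
-- def tieRopes(K, A: list):
--   # Single pass: keep a running sum; whenever it reaches K, count a rope and reset.
--   ropes = 0
--   acc = 0
--   for x in A:
--     acc += x
--     if acc >= K:
--       ropes += 1
--       acc = 0
--   return ropes
-- ===== Notes on version B (the rewrite author's own statement) =====
-- stated objective: faster
-- what changed: Replaces the destructive while-loop with pop(0)/insert(0,...) (each O(n)) by a single non-mutating pass that accumulates a running sum and counts/resets when it reaches K.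
import Mathlib
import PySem

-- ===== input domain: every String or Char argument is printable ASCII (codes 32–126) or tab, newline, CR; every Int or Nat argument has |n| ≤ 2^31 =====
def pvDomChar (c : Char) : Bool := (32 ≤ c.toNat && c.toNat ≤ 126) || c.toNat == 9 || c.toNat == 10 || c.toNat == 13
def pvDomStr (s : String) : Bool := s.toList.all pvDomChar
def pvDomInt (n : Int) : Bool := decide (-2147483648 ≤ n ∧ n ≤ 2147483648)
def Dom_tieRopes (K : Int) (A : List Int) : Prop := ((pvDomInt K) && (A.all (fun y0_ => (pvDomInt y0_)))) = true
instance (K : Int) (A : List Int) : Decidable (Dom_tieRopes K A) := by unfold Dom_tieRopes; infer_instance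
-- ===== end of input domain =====

-- B replaces A's destructive pop(0)/insert(0,..) loop by a single running-sum pass (faster);
-- Python A mutates its list argument in place (pop/insert) — the equivalence proved here is about the return value only.

-- ===== PORT A =====
-- while len(A) > 1: pop the first rope; if < K re-insert merged with the next, else count it.
def tieRopesLoop (K : Int) (ropes : Int) : List Int → Int × List Int
  | a :: b :: rest =>
      if a < K then tieRopesLoop K ropes ((a + b) :: rest)
      else tieRopesLoop K (ropes + 1) (b :: rest)
  | [a] => (ropes, [a])
  | [] => (ropes, [])
  termination_by l => l.length

def tieRopes (K : Int) (A : List Int) : Int :=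
  match tieRopesLoop K 0 A with
  | (ropes, a :: _) => if a ≥ K then ropes + 1 else ropes
  | (ropes, []) => ropes   -- Python raises IndexError here (A[0]); excluded by Pre_tieRopes

-- ===== PORT B =====
def tieRopesStep (K : Int) (st : Int × Int) (x : Int) : Int × Int :=
  let acc := st.2 + x
  if acc ≥ K then (st.1 + 1, 0) else (st.1, acc)

def tieRopes_alt (K : Int) (A : List Int) : Int :=
  (A.foldl (tieRopesStep K) (0, 0)).1

-- ===== PRECONDITION & SPEC =====
-- Python A evaluates A[0] after the loop, so it raises IndexError exactly when A is empty.
def Pre_tieRopes (K : Int) (A : List Int) : Prop := A ≠ []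
instance (K : Int) (A : List Int) : Decidable (Pre_tieRopes K A) := by unfold Pre_tieRopes; infer_instance
def pvWitness_tieRopes : Int × List Int := (4, [1, 2, 3, 4, 1, 1, 3])

def Spec_tieRopes (K : Int) (A : List Int) (out : Int) : Prop := out = tieRopes_alt K A
instance (K : Int) (A : List Int) (out : Int) : Decidable (Spec_tieRopes K A out) := by unfold Spec_tieRopes; infer_instance

-- ===== CLAIM (what is proved, stated in full; the proofs are below) =====
def Claim_equal_tieRopes : Prop := ∀ (K : Int) (A : List Int), Dom_tieRopes K A → Pre_tieRopes K A → Spec_tieRopes K A (tieRopes K A)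

-- ===== LEMMAS AND PROOFS =====

-- `norm` is the state B reaches after its counting/reset check.
def tieRopesNorm (K : Int) (st : Int × Int) : Int × Int :=
  if st.2 ≥ K then (st.1 + 1, 0) else st

theorem tieRopesStep_eq_norm (K c s x : Int) :
    tieRopesStep K (c, s) x = tieRopesNorm K (c, s + x) := rfl

-- Core invariant: A's loop-then-final-check on (a :: rest), starting with `ropes`
-- counted, equals B's fold continued from the normalised state of (ropes, a).
theorem tieRopes_loop_eq_fold (K : Int) (rest : List Int) :
    ∀ (a ropes : Int),
      (match tieRopesLoop K ropes (a :: rest) with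
        | (r, x :: _) => if x ≥ K then r + 1 else r
        | (r, []) => r) =
      (rest.foldl (tieRopesStep K) (tieRopesNorm K (ropes, a))).1 := by
  induction rest with
  | nil =>
      intro a ropes
      simp only [tieRopesLoop, List.foldl, tieRopesNorm]
      by_cases h : a ≥ K <;> simp [h]
  | cons b rs ih =>
      intro a ropes
      by_cases h : a < K
      · rw [tieRopesLoop, if_pos h]
        rw [ih (a + b) ropes]
        simp only [List.foldl, tieRopesNorm, ge_iff_le]
        rw [if_neg (by omega : ¬ K ≤ ((ropes, a) : Int × Int).2)]
        rw [tieRopesStep_eq_norm]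
        simp [tieRopesNorm]
      · rw [tieRopesLoop, if_neg h]
        rw [ih b (ropes + 1)]
        simp only [List.foldl, tieRopesNorm, ge_iff_le]
        rw [if_pos (by omega : K ≤ ((ropes, a) : Int × Int).2)]
        rw [tieRopesStep_eq_norm]
        simp [tieRopesNorm]

-- ===== VERDICT (by name: the statement is the Claim_ definition above) =====
theorem tieRopes_spec : Claim_equal_tieRopes := by
  intro K A _ hpre
  unfold Spec_tieRopes tieRopes tieRopes_alt
  cases A with
  | nil => exact absurd rfl hpre
  | cons a rest =>
      have := tieRopes_loop_eq_fold K rest a 0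
      simp only [List.foldl]
      rw [tieRopesStep_eq_norm]
      simpa using this
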